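-- pv_equiv track=rewrite | github.com/bkshin01/Algorithm | 프로그래머스/2/64065. 튜플/튜플.py | solution
-- ===== SOURCE A (Python) =====
-- def solution(s):
--     dic = {}
--     idx = 0
--     n = len(s)
--
--     while idx < n:
--         if s[idx].isdigit():
--             tmp = ''
--             while s[idx].isdigit():
--                 tmp += s[idx]
--                 idx += 1
--             dic[tmp] = dic.get(tmp, 0) + 1
--         idx += 1
--
--     return [int(k) for k, v in sorted(dic.items(), key=lambda x:x[1], reverse=True)]
-- ===== SOURCE B (Python) =====
-- def solution(s):
--     # Tokenize by translating every non-digit to a space and splitting,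
--     # count tokens, then emit keys grouped by distinct frequency, highest first.
--     tokens = ''.join(c if c.isdigit() else ' ' for c in s).split()
--     cnt = {}
--     for t in tokens:
--         cnt[t] = cnt.get(t, 0) + 1
--     out = []
--     for v in reversed(sorted(set(cnt.values()))):
--         for k, c in cnt.items():
--             if c == v:
--                 out.append(int(k))
--     return out
-- ===== Notes on version B (the rewrite author's own statement) =====
-- stated objective: alternative
-- what changed: A's index-based nested-while digit scanner plus a stable reverse sort is replaced by translating non-digits to spaces and splitting to get the tokens, counting them, and emitting keys grouped under each distinct frequency from highest to lowest (no key-sort of the items).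
-- outside the precondition, e.g. on solution('1'): A raises IndexError, B returns [1]
-- crash fix: On any string ending in a digit A's inner while reads s[len(s)] and raises IndexError; B tokenizes the whole string and returns the frequency-ordered values normally. — e.g. on solution("1"): A raises IndexError, B returns [1]
import Mathlib
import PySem

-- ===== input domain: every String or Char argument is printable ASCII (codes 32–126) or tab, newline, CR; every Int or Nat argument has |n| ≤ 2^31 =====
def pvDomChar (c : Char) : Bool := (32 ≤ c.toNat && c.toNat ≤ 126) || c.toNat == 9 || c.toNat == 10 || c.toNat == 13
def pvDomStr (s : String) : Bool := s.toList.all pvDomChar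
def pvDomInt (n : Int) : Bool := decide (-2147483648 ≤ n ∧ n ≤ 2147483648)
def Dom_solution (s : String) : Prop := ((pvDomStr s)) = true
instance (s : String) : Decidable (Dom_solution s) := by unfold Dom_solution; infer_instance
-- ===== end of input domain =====

-- B replaces A's index-based nested-while digit scanner and stable reverse sort by a
-- translate-to-spaces-and-split tokenization followed by grouping keys under each distinct
-- frequency in descending order (objective: alternative decomposition, same cost).

-- ===== PORT A =====
-- inner 'while s[idx].isdigit(): tmp += s[idx]; idx += 1' — collects the digit run, returns the rest
def pvTakeRun : List Char → List Char × List Char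
  | [] => ([], [])
  | c :: cs =>
    if PySem.Chars.isdigit c then ((c :: (pvTakeRun cs).1), (pvTakeRun cs).2) else ([], c :: cs)

theorem pvTakeRun_snd_length (l : List Char) : (pvTakeRun l).2.length ≤ l.length := by
  induction l with
  | nil => simp [pvTakeRun]
  | cons c cs ih => simp only [pvTakeRun]; split <;> simp <;> omega

def pvALoop : List Char → PySem.Dict String Int → PySem.Dict String Int
  | [], d => d
  | c :: cs, d =>
    if PySem.Chars.isdigit c then
      let r := (pvTakeRun (c :: cs)).1
      pvALoop ((pvTakeRun (c :: cs)).2.drop 1)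
        (d.insert (String.ofList r) (d.getD (String.ofList r) 0 + 1))
    else pvALoop cs d
  termination_by l _ => l.length
  decreasing_by
  · have h := pvTakeRun_snd_length (c :: cs); simp at h ⊢; omega
  · simp

-- int(k) in the final comprehension: the keys are nonempty digit runs, so ofStr? is always
-- `some`; the `.getD 0` default is unreachable
def solution (s : String) : List Int :=
  (PySem.List.sorted (pvALoop s.toList PySem.Dict.empty).items (fun kv => kv.2) true).map
    (fun kv => (PySem.Int.ofStr? kv.1).getD 0)

-- ===== PORT B =====
-- 'c if c.isdigit() else " "'
def pvTranslate (c : Char) : Char := if PySem.Chars.isdigit c then c else ' '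

-- ''.join over single characters is String.ofList of the mapped character list (exact)
def solution_alt (s : String) : List Int :=
  let tokens := PySem.Str.split₀ (String.ofList (s.toList.map pvTranslate))
  let cnt := tokens.foldl (fun d t => d.insert t (d.getD t 0 + 1))
    (PySem.Dict.empty : PySem.Dict String Int)
  ((PySem.List.sorted (PySem.Set.ofList cnt.values) (fun v => v) false).reverse).foldl
    (fun out v =>
      cnt.items.foldl
        (fun out kv => if kv.2 == v then out ++ [(PySem.Int.ofStr? kv.1).getD 0] else out) out)
    []

-- ===== PRECONDITION & SPEC =====
-- Pre_ excludes exactly the strings ending in a digit: there A's inner while reads s[n] and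
-- raises IndexError (A returns normally on every other input).
def Pre_solution (s : String) : Prop :=
  s.toList.getLast?.all (fun c => !PySem.Chars.isdigit c) = true
instance (s : String) : Decidable (Pre_solution s) := by unfold Pre_solution; infer_instance

def pvWitness_solution : String := "{{2},{2,1},{2,1,3},{2,1,3,4}}"

-- On strings ending in a digit A raises IndexError (its inner while runs past the end); B
-- tokenizes the whole string and returns the frequency-ordered values normally.
def Raises_solution (s : String) : Prop :=
  s.toList.getLast?.any PySem.Chars.isdigit = true
instance (s : String) : Decidable (Raises_solution s) := by unfold Raises_solution; infer_instance

def pvRaiseWitness_solution : String := "1"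
def pvRaiseWitnessOut_solution : List Int := [1]

def Spec_solution (s : String) (out : List Int) : Prop := out = solution_alt s
instance (s : String) (out : List Int) : Decidable (Spec_solution s out) := by
  unfold Spec_solution; infer_instance

-- ===== CLAIM (what is proved, stated in full; the proofs are below) =====
def Claim_equal_solution : Prop :=
  ∀ (s : String), Dom_solution s → Pre_solution s → Spec_solution s (solution s)

def Claim_raises_solution : Prop :=
  (∀ (s : String), Dom_solution s → Raises_solution s → ¬ Pre_solution s) ∧
  (Dom_solution (pvRaiseWitness_solution) ∧ Raises_solution (pvRaiseWitness_solution) ∧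
    solution_alt (pvRaiseWitness_solution) = pvRaiseWitnessOut_solution)

-- ===== LEMMAS AND PROOFS =====

theorem pvTakeRun_eq (l : List Char) :
    pvTakeRun l = (l.takeWhile PySem.Chars.isdigit, l.dropWhile PySem.Chars.isdigit) := by
  induction l with
  | nil => simp [pvTakeRun]
  | cons c cs ih =>
    simp only [pvTakeRun, List.takeWhile_cons, List.dropWhile_cons, ih]
    split <;> simp

def pvRuns : List Char → List (List Char)
  | [] => []
  | c :: cs =>
    if h : PySem.Chars.isdigit c then
      ((c :: cs).takeWhile PySem.Chars.isdigit) :: pvRuns ((c :: cs).dropWhile PySem.Chars.isdigit)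
    else pvRuns cs
  termination_by l => l.length
  decreasing_by
  · simp [h]
    have := List.length_dropWhile_le PySem.Chars.isdigit cs
    omega
  · simp

theorem pvALoop_eq_foldl :
    ∀ (n : Nat) (l : List Char), l.length ≤ n → ∀ d,
      pvALoop l d = (pvRuns l).foldl
        (fun d r => d.insert (String.ofList r) (d.getD (String.ofList r) 0 + 1)) d := by
  intro n
  induction n with
  | zero =>
    intro l hl d
    have : l = [] := by cases l <;> simp at hl ⊢
    subst this; simp [pvALoop, pvRuns]
  | succ n ih =>
    intro l hl d
    match l with
    | [] => simp [pvALoop, pvRuns]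
    | c :: cs =>
      by_cases h : PySem.Chars.isdigit c
      · rw [pvALoop, pvRuns]
        simp only [h, if_true, dif_pos, pvTakeRun_eq]
        simp only [List.dropWhile_cons, List.takeWhile_cons, h, if_true]
        cases ht : cs.dropWhile PySem.Chars.isdigit with
        | nil => simp [pvALoop, pvRuns]
        | cons d2 rest =>
          have hd2 : PySem.Chars.isdigit d2 = false := by
            have := List.head?_dropWhile_not PySem.Chars.isdigit cs
            rw [ht] at this; simpa using this
          have hlen : rest.length ≤ n := by
            have := List.length_dropWhile_le PySem.Chars.isdigit cs
            rw [ht] at this; simp at this hl; omega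
          simp only [List.drop_succ_cons, List.drop_zero, List.foldl_cons]
          rw [ih rest hlen]
          rw [pvRuns]
          simp [hd2]
      · rw [pvALoop, pvRuns]
        simp only [h, if_false, dif_neg, not_false_iff]
        exact ih cs (by simp at hl; omega) d

theorem pvGo_nil (cur acc) :
    PySem.Chars.split₀.go [] cur acc =
      if cur.isEmpty then acc.reverse else (cur.reverse :: acc).reverse := rfl

theorem pvGo_cons (c : Char) (rest cur acc) :
    PySem.Chars.split₀.go (c :: rest) cur acc =
      if PySem.Chars.isspace c then
        (if cur.isEmpty then PySem.Chars.split₀.go rest [] acc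
         else PySem.Chars.split₀.go rest [] (cur.reverse :: acc))
      else PySem.Chars.split₀.go rest (c :: cur) acc := rfl

theorem pvIsspace_of_isdigit (c : Char) (h : PySem.Chars.isdigit c = true) :
    PySem.Chars.isspace c = false := by
  have h0 : ('0' : Char) ≤ c ∧ c ≤ '9' := by simpa [PySem.Chars.isdigit] using h
  have hb : 48 ≤ c.toNat ∧ c.toNat ≤ 57 := by
    obtain ⟨a, b⟩ := h0
    rw [Char.le_def, UInt32.le_iff_toNat_le] at a b
    exact ⟨a, b⟩
  simp only [PySem.Chars.isspace]
  simp
  omega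

theorem pvIsspace_space : PySem.Chars.isspace ' ' = true := by decide

theorem pvRuns_cons_digit (c : Char) (cs : List Char) (h : PySem.Chars.isdigit c = true) :
    pvRuns (c :: cs) =
      (c :: cs.takeWhile PySem.Chars.isdigit) :: pvRuns (cs.dropWhile PySem.Chars.isdigit) := by
  rw [pvRuns]
  simp [h, List.takeWhile_cons, List.dropWhile_cons]

theorem pvRuns_cons_nondigit (c : Char) (cs : List Char) (h : PySem.Chars.isdigit c = false) :
    pvRuns (c :: cs) = pvRuns cs := by
  rw [pvRuns]; simp [h]

theorem pvGo_spec :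
    ∀ (n : Nat) (l : List Char), l.length ≤ n →
      (∀ acc, PySem.Chars.split₀.go (l.map pvTranslate) [] acc = acc.reverse ++ pvRuns l) ∧
      (∀ cur acc, cur ≠ [] →
        PySem.Chars.split₀.go (l.map pvTranslate) cur acc =
          acc.reverse ++ (cur.reverse ++ l.takeWhile PySem.Chars.isdigit) ::
            pvRuns (l.dropWhile PySem.Chars.isdigit)) := by
  intro n
  induction n with
  | zero =>
    intro l hl
    have : l = [] := by cases l <;> simp at hl ⊢
    subst this
    refine ⟨fun acc => by simp [pvGo_nil, pvRuns], fun cur acc hcur => ?_⟩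
    simp [pvGo_nil, pvRuns, List.isEmpty_iff, hcur]
  | succ n ih =>
    intro l hl
    match l with
    | [] =>
      refine ⟨fun acc => by simp [pvGo_nil, pvRuns], fun cur acc hcur => ?_⟩
      simp [pvGo_nil, pvRuns, List.isEmpty_iff, hcur]
    | c :: cs =>
      have hlen : cs.length ≤ n := by simp at hl; omega
      constructor
      · intro acc
        by_cases h : PySem.Chars.isdigit c
        · have ht : pvTranslate c = c := by simp [pvTranslate, h]
          rw [List.map_cons, ht, pvGo_cons]
          rw [pvIsspace_of_isdigit c h]
          simp only [if_false, Bool.false_eq_true]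
          rw [(ih cs hlen).2 [c] acc (by simp)]
          rw [pvRuns_cons_digit c cs h]
          simp
        · have ht : pvTranslate c = ' ' := by simp [pvTranslate, h]
          rw [List.map_cons, ht, pvGo_cons, pvIsspace_space]
          simp only [if_true, List.isEmpty_nil]
          rw [(ih cs hlen).1 acc, pvRuns_cons_nondigit c cs (by simpa using h)]
      · intro cur acc hcur
        by_cases h : PySem.Chars.isdigit c
        · have ht : pvTranslate c = c := by simp [pvTranslate, h]
          rw [List.map_cons, ht, pvGo_cons, pvIsspace_of_isdigit c h]
          simp only [if_false, Bool.false_eq_true]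
          rw [(ih cs hlen).2 (c :: cur) acc (by simp)]
          simp [List.takeWhile_cons, List.dropWhile_cons, h]
        · have ht : pvTranslate c = ' ' := by simp [pvTranslate, h]
          rw [List.map_cons, ht, pvGo_cons, pvIsspace_space]
          simp only [if_true, List.isEmpty_iff, hcur, if_neg hcur]
          rw [(ih cs hlen).1 (cur.reverse :: acc)]
          rw [List.takeWhile_cons, List.dropWhile_cons]
          simp only [h, if_false, Bool.false_eq_true]
          rw [pvRuns_cons_nondigit c cs (by simpa using h)]
          simp

theorem pvSplit_eq_runs (l : List Char) :
    PySem.Chars.split₀ (l.map pvTranslate) = pvRuns l := by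
  have := (pvGo_spec l.length l (le_refl _)).1 []
  simpa [PySem.Chars.split₀] using this

theorem pvInsertBy_cons {α : Type} (b : α → α → Bool) (x y : α) (ys : List α) :
    PySem.List.insertBy b x (y :: ys) =
      if b x y then x :: y :: ys else y :: PySem.List.insertBy b x ys := rfl

theorem pvInsertBy_append {α : Type} (b : α → α → Bool) (x : α) (A B : List α)
    (h : ∀ a ∈ A, b x a = false) :
    PySem.List.insertBy b x (A ++ B) = A ++ PySem.List.insertBy b x B := by
  induction A with
  | nil => simp
  | cons a A ih =>
    simp only [List.cons_append, pvInsertBy_cons, h a (by simp)]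
    simp only [Bool.false_eq_true, if_false, List.cons_append]
    rw [ih (fun a ha => h a (by simp [ha]))]

theorem pvSorted_rev_append_singleton (M : List (String × Int)) (x : String × Int) :
    PySem.List.sorted (M ++ [x]) (fun kv => kv.2) true =
      PySem.List.insertBy (fun a b => decide (b.2 < a.2)) x
        (PySem.List.sorted M (fun kv => kv.2) true) := by
  rw [PySem.List.sorted_rev_eq_foldl_insertBy, List.foldl_append, List.foldl_cons,
    List.foldl_nil, ← PySem.List.sorted_rev_eq_foldl_insertBy]

-- stable descending sort by an Int key: all max-key elements first (original order), rest sorted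

theorem pvSorted_rev_split (v : Int) (L : List (String × Int)) (h : ∀ kv ∈ L, kv.2 ≤ v) :
    PySem.List.sorted L (fun kv => kv.2) true =
      L.filter (fun kv => kv.2 == v) ++
        PySem.List.sorted (L.filter (fun kv => !(kv.2 == v))) (fun kv => kv.2) true := by
  induction L using List.reverseRecOn with
  | nil => simp
  | append_singleton L x ih =>
    have hL : ∀ kv ∈ L, kv.2 ≤ v := fun kv hkv => h kv (by simp [hkv])
    have hx : x.2 ≤ v := h x (by simp)
    rw [pvSorted_rev_append_singleton, ih hL]
    by_cases hxv : x.2 = v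
    · have hGf : ∀ a ∈ L.filter (fun kv => kv.2 == v),
          (fun a b => decide ((b : String × Int).2 < a.2)) x a = false := by
        intro a ha
        have : a.2 = v := by simpa using (List.of_mem_filter ha)
        simp [this, hxv]
      rw [pvInsertBy_append _ _ _ _ hGf]
      have hfilter1 : (L ++ [x]).filter (fun kv => kv.2 == v) =
          L.filter (fun kv => kv.2 == v) ++ [x] := by simp [List.filter_append, hxv]
      have hfilter2 : (L ++ [x]).filter (fun kv => !(kv.2 == v)) =
          L.filter (fun kv => !(kv.2 == v)) := by simp [List.filter_append, hxv]
      rw [hfilter1, hfilter2, List.append_assoc]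
      congr 1
      cases hS : PySem.List.sorted (L.filter (fun kv => !(kv.2 == v))) (fun kv => kv.2) true with
      | nil => rfl
      | cons y t =>
        have hy : y ∈ L.filter (fun kv => !(kv.2 == v)) := by
          rw [← PySem.List.mem_sorted (key := fun kv => kv.2) (rev := true), hS]; simp
        have h1 : y.2 ≤ v := hL y (List.mem_of_mem_filter hy)
        have h2 : ¬ (y.2 = v) := by simpa using (List.of_mem_filter hy)
        have hylt : y.2 < x.2 := by omega
        rw [pvInsertBy_cons]
        simp [hylt]
    · have hxlt : x.2 < v := lt_of_le_of_ne hx hxv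
      have hGf : ∀ a ∈ L.filter (fun kv => kv.2 == v),
          (fun a b => decide ((b : String × Int).2 < a.2)) x a = false := by
        intro a ha
        have : a.2 = v := by simpa using (List.of_mem_filter ha)
        simp only [decide_eq_false_iff_not]
        omega
      rw [pvInsertBy_append _ _ _ _ hGf]
      have hfilter1 : (L ++ [x]).filter (fun kv => kv.2 == v) =
          L.filter (fun kv => kv.2 == v) := by simp [List.filter_append, hxv]
      have hfilter2 : (L ++ [x]).filter (fun kv => !(kv.2 == v)) =
          L.filter (fun kv => !(kv.2 == v)) ++ [x] := by simp [List.filter_append, hxv]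
      rw [hfilter1, hfilter2, pvSorted_rev_append_singleton]

theorem pvFlatMap_congr {A B : Type} (l : List A) (f g : A → List B)
    (h : ∀ x ∈ l, f x = g x) : l.flatMap f = l.flatMap g := by
  induction l with
  | nil => rfl
  | cons a l ih =>
    simp only [List.flatMap_cons, h a (by simp)]
    rw [ih (fun x hx => h x (by simp [hx]))]

theorem pvSorted_rev_groups (vs : List Int) (L : List (String × Int))
    (hdec : vs.Pairwise (fun a b => b < a))
    (hmem : ∀ u, u ∈ vs ↔ u ∈ L.map (fun kv => kv.2)) :
    PySem.List.sorted L (fun kv => kv.2) true =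
      vs.flatMap (fun v => L.filter (fun kv => kv.2 == v)) := by
  induction vs generalizing L with
  | nil =>
    have : L = [] := by
      cases L with
      | nil => rfl
      | cons kv t =>
        exfalso
        have := (hmem kv.2).2 (by simp)
        simp at this
    subst this; simp [PySem.List.sorted_eq_nil_iff]
  | cons v vs ih =>
    have hlt : ∀ u ∈ vs, u < v := by
      intro u hu; exact (List.pairwise_cons.1 hdec).1 u hu
    have hle : ∀ kv ∈ L, kv.2 ≤ v := by
      intro kv hkv
      have : kv.2 ∈ v :: vs := (hmem kv.2).2 (by exact List.mem_map_of_mem hkv)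
      rcases this with _ | h
      · exact le_refl _
      · exact le_of_lt (hlt _ (by assumption))
    rw [pvSorted_rev_split v L hle, List.flatMap_cons]
    congr 1
    rw [ih (List.filter (fun kv => !(kv.2 == v)) L) (List.pairwise_cons.1 hdec).2 ?_]
    · apply pvFlatMap_congr
      intro u hu
      have huv : u ≠ v := by have := hlt u hu; omega
      rw [List.filter_filter]
      apply List.filter_congr
      intro kv _
      by_cases hk : kv.2 = u <;> simp [hk, huv]
    · intro u
      constructor
      · intro hu
        have huv : u ≠ v := by have := hlt u hu; omega
        have : u ∈ L.map (fun kv => kv.2) := (hmem u).1 (by simp [hu])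
        rcases List.mem_map.1 this with ⟨kv, hkv, rfl⟩
        exact List.mem_map_of_mem (by simp [List.mem_filter, hkv, huv])
      · intro hu
        rcases List.mem_map.1 hu with ⟨kv, hkv, rfl⟩
        have h2 : ¬ (kv.2 = v) := by simpa using (List.of_mem_filter hkv)
        have : kv.2 ∈ v :: vs := (hmem kv.2).2 (List.mem_map_of_mem (List.mem_of_mem_filter hkv))
        rcases this with _ | h
        · exact absurd rfl h2
        · assumption

theorem pvStrSplit₀_eq (t : String) :
    PySem.Str.split₀ t = (PySem.Chars.split₀ t.toList).map String.ofList := by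
  have hinj : Function.Injective (List.map String.toList) :=
    List.map_injective_iff.2 (fun a b h => by
      have := congrArg String.ofList h
      simpa [String.ofList_toList] using this)
  apply hinj
  rw [PySem.Str.split₀_map_toList, List.map_map]
  simp [Function.comp_def, String.toList_ofList]

theorem pvMain (s : String) : solution s = solution_alt s := by
  unfold solution solution_alt
  dsimp only
  rw [pvStrSplit₀_eq]
  simp only [String.toList_ofList]
  rw [pvSplit_eq_runs]
  rw [List.foldl_map]
  rw [← pvALoop_eq_foldl s.toList.length s.toList (le_refl _) PySem.Dict.empty]
  simp only [PySem.List.foldl_append_if, PySem.List.foldl_append_eq_flatMap, List.nil_append]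
  rw [← List.map_flatMap]
  apply congrArg
  apply pvSorted_rev_groups
  · rw [List.pairwise_reverse]
    exact PySem.List.sorted_ofList_pairwise_lt _
  · intro u
    simp [List.mem_reverse, PySem.List.mem_sorted, PySem.Set.mem_ofList, PySem.Dict.values]

-- ===== VERDICT (by name: the statement is the Claim_ definition above) =====
theorem solution_spec : Claim_equal_solution := by
  intro s _ _
  show solution s = solution_alt s
  exact pvMain s

@[simp] theorem solution_raises : Claim_raises_solution := by
  unfold Claim_raises_solution
  constructor
  · intro s _ hr
    unfold Raises_solution at hr
    unfold Pre_solution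
    cases h : s.toList.getLast? <;> simp [h] at hr ⊢ <;> simp [hr]
  · exact ⟨by decide, by decide, by decide⟩
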